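-- pv_equiv track=rewrite | github.com/BashinskiyFedor/python__lessons | Bilinear.py | Bilinear
-- ===== SOURCE A (Python) =====
-- def Bilinear(matrix, width, height):
--     newMatrix = []
--     kWidth = 2
--     kHeight = 2
--     for i in range(510):
--         bufferTop = []
--         bufferDown = []
--         bufferMiddle = []
--         for j in range(len(matrix)-2):
--             topNumber = int(int(matrix[i][j])+(int(matrix[i][j + kWidth]) - int(matrix[i][j]))/kWidth)
--             downNumber = int(int(matrix[i + 1][j])+(int(matrix[i][j+1]) - int(matrix[i][j]))/kHeight)
--             bufferTop.extend([matrix[i][j], str(topNumber), matrix[i][j+1]])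
--             bufferDown.extend([matrix[i+1][j], str(downNumber), matrix[i + 1][j + 1]])
--         for l in range(len(bufferTop)):
--             middleNumber = int(bufferTop[l]) + int(int(int(bufferDown[l]) - int(bufferTop[l]))/kWidth)
--             bufferMiddle.append(str(middleNumber))
--         newMatrix.extend([bufferTop, bufferMiddle, bufferDown])
--     return newMatrix
-- ===== SOURCE B (Python) =====
-- def _mid(x, y):
--     # middle value between two cells given as strings
--     a = int(x)
--     b = int(y)
--     return str(a + int((b - a) / 2))
--
--
-- def Bilinear(matrix, width, height):
--     # One fused pass per row-pair: top, middle and down rows are built together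
--     # from the same five cells per column, so there is no second pass over the
--     # built buffers.
--     newMatrix = []
--     n = len(matrix) - 2
--     for i in range(510):
--         top, middle, down = [], [], []
--         for j in range(n):
--             sa, sm, sc = matrix[i][j], matrix[i][j + 1], matrix[i][j + 2]
--             sb, sb2 = matrix[i + 1][j], matrix[i + 1][j + 1]
--             st = str(int(int(sa) + (int(sc) - int(sa)) / 2))
--             sd = str(int(int(sb) + (int(sm) - int(sa)) / 2))
--             top += [sa, st, sm]
--             middle += [_mid(sa, sb), _mid(st, sd), _mid(sm, sb2)]
--             down += [sb, sd, sb2]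
--         newMatrix += [top, middle, down]
--     return newMatrix
-- ===== Notes on version B (the rewrite author's own statement) =====
-- stated objective: alternative
-- what changed: B fuses A's two inner passes into one: the middle row is computed per column from the same five cells while the top and down rows are built, eliminating A's second pass that re-indexes and re-parses the built buffers.
import Mathlib
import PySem

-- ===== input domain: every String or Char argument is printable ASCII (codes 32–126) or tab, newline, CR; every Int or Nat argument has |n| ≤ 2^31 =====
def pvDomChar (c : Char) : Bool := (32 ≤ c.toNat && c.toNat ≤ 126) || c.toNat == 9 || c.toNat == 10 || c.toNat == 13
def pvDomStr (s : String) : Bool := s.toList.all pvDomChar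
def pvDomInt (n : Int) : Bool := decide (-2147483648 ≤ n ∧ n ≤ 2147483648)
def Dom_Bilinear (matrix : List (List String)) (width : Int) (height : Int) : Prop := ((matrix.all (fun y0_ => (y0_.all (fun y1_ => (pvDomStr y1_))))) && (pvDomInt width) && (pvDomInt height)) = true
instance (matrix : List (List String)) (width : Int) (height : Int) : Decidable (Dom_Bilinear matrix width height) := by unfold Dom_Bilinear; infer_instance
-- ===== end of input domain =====

-- B fuses A's two inner passes into one: the middle row is computed per column from the
-- same five cells while the top and down rows are built, eliminating A's second pass over
-- the built buffers. Same cost class; objective: alternative decomposition.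

-- shared plumbing for Python primitives (used by both ports, which do the same arithmetic):
-- int(s); Pre_ guarantees the parse succeeds, so the default is never the value used
def pInt (s : String) : Int := (PySem.Int.ofStr? s).getD 0
-- matrix[i][j]; Pre_ guarantees both indexes are in range, so the defaults are never used
def pEntry (matrix : List (List String)) (i j : Nat) : String := (matrix.getD i []).getD j ""
-- Python float values occurring here are always integer multiples of 1/2, so a float is
-- modelled EXACTLY as the integer 2*value ("half-int").  pyHalfRound k = the IEEE-754
-- double nearest to k/2 (round half to even, 53-bit mantissa), as a half-int; exact for
-- all k (no subnormals arise: every value here is 0 or ≥ 1/2 in magnitude).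
def pyHalfRound (k : Int) : Int :=
  let a := k.natAbs
  if a ≤ 2 ^ 53 then k
  else
    let sh := (Nat.log2 a + 1) - 53
    let p : Nat := 2 ^ sh
    let q := a / p
    let r := a % p
    let q' := if 2 * r < p then q else if p < 2 * r then q + 1 else if q % 2 = 0 then q else q + 1
    (if k < 0 then -1 else 1) * ((q' * p : Nat) : Int)
-- float(n) for an int n, as a half-int
def pyToF (n : Int) : Int := pyHalfRound (2 * n)
-- float addition of two half-ints (exact sum, then one IEEE rounding — exactly Python's +)
def pyAddF (x y : Int) : Int := pyHalfRound (x + y)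
-- int(f): truncation of a half-int toward zero — exactly Python's int() on a finite float
def pyTrunc (x : Int) : Int := PySem.Int.truncdiv x 2

-- ===== PORT A =====
def Bilinear (matrix : List (List String)) (width : Int) (height : Int) : List (List String) :=
  -- newMatrix is a Python list grown by extend; Array.push is its O(1) analogue
  ((List.range 510).foldl (fun (newMatrix : Array (List String)) i =>
    -- inner pass 1: build bufferTop and bufferDown
    let bufs := (List.range (matrix.length - 2)).foldl (fun (bufs : List String × List String) j =>
      -- topNumber = int(int(m[i][j]) + (int(m[i][j+2]) - int(m[i][j]))/2); the int/int
      -- true division and the int+float addition are one IEEE rounding each (pyHalfRound)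
      let topNumber := pyTrunc (pyAddF (pyToF (pInt (pEntry matrix i j))) (pyHalfRound (pInt (pEntry matrix i (j+2)) - pInt (pEntry matrix i j))))
      -- downNumber = int(int(m[i+1][j]) + (int(m[i][j+1]) - int(m[i][j]))/2)
      let downNumber := pyTrunc (pyAddF (pyToF (pInt (pEntry matrix (i+1) j))) (pyHalfRound (pInt (pEntry matrix i (j+1)) - pInt (pEntry matrix i j))))
      (bufs.1 ++ [pEntry matrix i j, PySem.Int.toStr topNumber, pEntry matrix i (j+1)],
       bufs.2 ++ [pEntry matrix (i+1) j, PySem.Int.toStr downNumber, pEntry matrix (i+1) (j+1)]))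
      ([], [])
    -- inner pass 2: middle row from the two buffers, by index
    let bufferMiddle := (List.range bufs.1.length).foldl (fun bm l =>
      -- middleNumber = int(bufferTop[l]) + int(int(int(bufferDown[l]) - int(bufferTop[l]))/2)
      bm ++ [PySem.Int.toStr (pInt (bufs.1.getD l "") + pyTrunc (pyHalfRound (pInt (bufs.2.getD l "") - pInt (bufs.1.getD l ""))))]) []
    ((newMatrix.push bufs.1).push bufferMiddle).push bufs.2) #[]).toList

-- ===== PORT B =====
-- _mid(x, y) = str(int(x) + int((int(y) - int(x))/2))
def midStr (x y : String) : String :=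
  PySem.Int.toStr (pInt x + pyTrunc (pyHalfRound (pInt y - pInt x)))

def Bilinear_alt (matrix : List (List String)) (width : Int) (height : Int) : List (List String) :=
  ((List.range 510).foldl (fun (newMatrix : Array (List String)) i =>
    -- single fused pass: top, middle and down built together from the same five cells
    let bufs := (List.range (matrix.length - 2)).foldl
      (fun (bufs : List String × List String × List String) j =>
        let sa := pEntry matrix i j
        let sm := pEntry matrix i (j+1)
        let sc := pEntry matrix i (j+2)
        let sb := pEntry matrix (i+1) j
        let sb2 := pEntry matrix (i+1) (j+1)
        -- st = str(int(int(sa) + (int(sc) - int(sa))/2)), sd likewise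
        let st := PySem.Int.toStr (pyTrunc (pyAddF (pyToF (pInt sa)) (pyHalfRound (pInt sc - pInt sa))))
        let sd := PySem.Int.toStr (pyTrunc (pyAddF (pyToF (pInt sb)) (pyHalfRound (pInt sm - pInt sa))))
        (bufs.1 ++ [sa, st, sm],
         bufs.2.1 ++ [midStr sa sb, midStr st sd, midStr sm sb2],
         bufs.2.2 ++ [sb, sd, sb2]))
      ([], [], [])
    ((newMatrix.push bufs.1).push bufs.2.1).push bufs.2.2) #[]).toList

-- ===== PRECONDITION & SPEC =====
-- entry parses as a Python int
def pvParses (s : String) : Bool := (PySem.Int.ofStr? s).isSome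
-- a half-int float value is finite (otherwise Python raises OverflowError at that step)
def pvFin (k : Int) : Bool := k.natAbs < 2 ^ 1025
-- parsed value of matrix[i][j]
def pvVal (matrix : List (List String)) (i j : Nat) : Int := pInt (pEntry matrix i j)
-- the per-column float intermediates of one cell are all finite: exactly the condition
-- under which Python's arithmetic for that cell returns instead of raising OverflowError
def pvCellOk (a m1 c b b2 : Int) : Bool :=
  let f1 := pyHalfRound (c - a)
  let fa := pyToF a
  let f2 := pyAddF fa f1
  let f3 := pyHalfRound (m1 - a)
  let fb := pyToF b
  let f4 := pyAddF fb f3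
  pvFin f1 && pvFin fa && pvFin f2 && pvFin f3 && pvFin fb && pvFin f4 &&
  pvFin (pyHalfRound (b - a)) && pvFin (pyHalfRound (pyTrunc f4 - pyTrunc f2)) && pvFin (pyHalfRound (b2 - m1))

-- Pre_ admits exactly the inputs A returns on.  With ≤ 2 rows both inner loops are empty
-- and nothing is indexed or parsed; with 3..510 rows A's hardcoded range(510) hits an
-- IndexError; with ≥ 511 rows the entries A reads must be in range and parse as ints
-- (else IndexError/ValueError), and every float intermediate must stay finite (else
-- Python raises OverflowError; only entries of 300+ digits can violate this).
def Pre_Bilinear (matrix : List (List String)) (width : Int) (height : Int) : Prop :=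
  matrix.length ≤ 2 ∨
  (511 ≤ matrix.length ∧
   (∀ i ∈ List.range 510, matrix.length ≤ (matrix.getD i []).length ∧
      ∀ s ∈ (matrix.getD i []).take matrix.length, pvParses s = true) ∧
   matrix.length - 1 ≤ (matrix.getD 510 []).length ∧
   (∀ s ∈ (matrix.getD 510 []).take (matrix.length - 1), pvParses s = true) ∧
   (∀ i ∈ List.range 510, ∀ j ∈ List.range (matrix.length - 2),
      pvCellOk (pvVal matrix i j) (pvVal matrix i (j+1)) (pvVal matrix i (j+2))
               (pvVal matrix (i+1) j) (pvVal matrix (i+1) (j+1)) = true))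

instance (matrix : List (List String)) (width : Int) (height : Int) : Decidable (Pre_Bilinear matrix width height) := by
  unfold Pre_Bilinear; infer_instance

def pvWitness_Bilinear : List (List String) × Int × Int := ([["3", "-1"], ["4", "2"]], 2, 2)

def Spec_Bilinear (matrix : List (List String)) (width : Int) (height : Int) (out : List (List String)) : Prop := out = Bilinear_alt matrix width height
instance (matrix : List (List String)) (width : Int) (height : Int) (out : List (List String)) : Decidable (Spec_Bilinear matrix width height out) := by unfold Spec_Bilinear; infer_instance

-- ===== CLAIM (what is proved, stated in full; the proofs are below) =====
def Claim_equal_Bilinear : Prop := ∀ (matrix : List (List String)) (width : Int) (height : Int), Dom_Bilinear matrix width height → Pre_Bilinear matrix width height → Spec_Bilinear matrix width height (Bilinear matrix width height)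

-- ===== LEMMAS AND PROOFS =====

-- the three per-column triples both programs append
def topT (M : List (List String)) (i j : Nat) : List String :=
  [pEntry M i j,
   PySem.Int.toStr (pyTrunc (pyAddF (pyToF (pInt (pEntry M i j))) (pyHalfRound (pInt (pEntry M i (j+2)) - pInt (pEntry M i j))))),
   pEntry M i (j+1)]

def downT (M : List (List String)) (i j : Nat) : List String :=
  [pEntry M (i+1) j,
   PySem.Int.toStr (pyTrunc (pyAddF (pyToF (pInt (pEntry M (i+1) j))) (pyHalfRound (pInt (pEntry M i (j+1)) - pInt (pEntry M i j))))),
   pEntry M (i+1) (j+1)]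

def midT (M : List (List String)) (i j : Nat) : List String :=
  List.zipWith midStr (topT M i j) (downT M i j)

-- A's first inner pass produces the flattened top/down triples
theorem innerA_eq (M : List (List String)) (i : Nat) (js : List Nat) (bt bd : List String) :
    js.foldl (fun (bufs : List String × List String) j =>
      let topNumber := pyTrunc (pyAddF (pyToF (pInt (pEntry M i j))) (pyHalfRound (pInt (pEntry M i (j+2)) - pInt (pEntry M i j))))
      let downNumber := pyTrunc (pyAddF (pyToF (pInt (pEntry M (i+1) j))) (pyHalfRound (pInt (pEntry M i (j+1)) - pInt (pEntry M i j))))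
      (bufs.1 ++ [pEntry M i j, PySem.Int.toStr topNumber, pEntry M i (j+1)],
       bufs.2 ++ [pEntry M (i+1) j, PySem.Int.toStr downNumber, pEntry M (i+1) (j+1)])) (bt, bd)
    = (bt ++ js.flatMap (topT M i), bd ++ js.flatMap (downT M i)) := by
  induction js generalizing bt bd with
  | nil => simp
  | cons j js ih => simp [List.flatMap_cons, ih, topT, downT]

-- B's fused pass produces the flattened top/middle/down triples
theorem innerB_eq (M : List (List String)) (i : Nat) (js : List Nat) (bt bm bd : List String) :
    js.foldl (fun (bufs : List String × List String × List String) j =>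
      let sa := pEntry M i j
      let sm := pEntry M i (j+1)
      let sc := pEntry M i (j+2)
      let sb := pEntry M (i+1) j
      let sb2 := pEntry M (i+1) (j+1)
      let st := PySem.Int.toStr (pyTrunc (pyAddF (pyToF (pInt sa)) (pyHalfRound (pInt sc - pInt sa))))
      let sd := PySem.Int.toStr (pyTrunc (pyAddF (pyToF (pInt sb)) (pyHalfRound (pInt sm - pInt sa))))
      (bufs.1 ++ [sa, st, sm],
       bufs.2.1 ++ [midStr sa sb, midStr st sd, midStr sm sb2],
       bufs.2.2 ++ [sb, sd, sb2])) (bt, bm, bd)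
    = (bt ++ js.flatMap (topT M i), bm ++ js.flatMap (midT M i), bd ++ js.flatMap (downT M i)) := by
  induction js generalizing bt bm bd with
  | nil => simp
  | cons j js ih => simp [List.flatMap_cons, ih, topT, downT, midT]

-- A's indexed middle pass is a zipWith over the two buffers
theorem midpass_eq (T D : List String) (h : T.length = D.length) (acc : List String) :
    (List.range T.length).foldl (fun bm l =>
      bm ++ [PySem.Int.toStr (pInt (T.getD l "") + pyTrunc (pyHalfRound (pInt (D.getD l "") - pInt (T.getD l ""))))]) acc
    = acc ++ List.zipWith midStr T D := by
  induction T generalizing D acc with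
  | nil => simp
  | cons x T ih =>
    cases D with
    | nil => simp at h
    | cons y D =>
      simp only [List.length_cons, List.range_succ_eq_map, List.foldl_cons, List.foldl_map,
                 List.getD_cons_succ, List.getD_cons_zero, List.zipWith_cons_cons]
      rw [ih D (by simpa using h)]
      simp [midStr]

-- zipWith midStr distributes over the flattened equal-length triples
theorem zip_flat (M : List (List String)) (i : Nat) (js : List Nat) :
    List.zipWith midStr (js.flatMap (topT M i)) (js.flatMap (downT M i)) = js.flatMap (midT M i) := by
  induction js with
  | nil => rfl
  | cons j js ih =>
    simp only [List.flatMap_cons]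
    rw [List.zipWith_append (by simp [topT, downT])]
    rw [ih]; rfl

set_option maxRecDepth 8000 in
theorem Bilinear_spec : Claim_equal_Bilinear := by
  intro M w h _ _
  show Bilinear M w h = Bilinear_alt M w h
  unfold Bilinear Bilinear_alt
  refine congrArg Array.toList ?_
  congr 1
  funext nm i
  simp only [innerA_eq, innerB_eq, List.nil_append]
  rw [midpass_eq _ _ (by simp [List.length_flatMap, topT, downT])]
  rw [zip_flat]
  rfl
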